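-- pv_equiv track=rewrite | github.com/LiquidityC/aoc | 2016/day_07/main.py | has_any_bab
-- ===== SOURCE A (Python) =====
-- def has_any_bab(abas, sequences):
--     for seq in sequences:
--         for i in range(len(seq) - 2):
--             a, b, c = seq[i:i+3]
--             if a == c and a != b:
--                 if (b, a) in abas:
--                     return True
--     return False
-- ===== SOURCE B (Python) =====
-- def has_any_bab(abas, sequences):
--     for x, y in abas:
--         if len(x) == 1 and len(y) == 1 and x != y:
--             bab = y + x + y
--             if any(bab in seq for seq in sequences):
--                 return True
--     return False
-- ===== Notes on version B (the rewrite author's own statement) =====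
-- stated objective: alternative
-- what changed: B inverts the loop structure: instead of scanning every 3-char window of every sequence and testing (b,a) membership in abas, it iterates over abas and, for each single-char pair (x,y) with x!=y, does a substring search for the bab string y+x+y in the sequences.
import Mathlib
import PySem

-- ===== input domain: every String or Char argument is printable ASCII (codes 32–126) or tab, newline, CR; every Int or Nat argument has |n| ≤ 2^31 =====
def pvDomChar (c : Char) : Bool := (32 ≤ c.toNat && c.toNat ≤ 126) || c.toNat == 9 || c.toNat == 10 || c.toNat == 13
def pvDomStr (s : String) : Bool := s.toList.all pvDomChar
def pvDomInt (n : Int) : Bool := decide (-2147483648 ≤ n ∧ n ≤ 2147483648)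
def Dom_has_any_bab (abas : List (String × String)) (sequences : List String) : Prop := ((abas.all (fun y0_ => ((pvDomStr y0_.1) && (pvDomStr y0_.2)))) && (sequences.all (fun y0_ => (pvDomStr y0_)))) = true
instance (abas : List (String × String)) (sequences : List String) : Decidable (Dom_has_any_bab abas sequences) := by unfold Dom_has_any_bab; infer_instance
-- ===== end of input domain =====

-- B inverts the loops: instead of A's scan of every 3-char window testing membership in abas,
-- it iterates over abas and substring-searches the bab string y+x+y in the sequences (alternative).

-- ===== PORT A =====
-- for seq in sequences: for i in range(len(seq)-2): a,b,c = seq[i:i+3]; …  (the unpack always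
-- sees exactly 3 chars, so the impossible non-3 match arm returns false; it is never reached)
def has_any_bab (abas : List (String × String)) (sequences : List String) : Bool :=
  sequences.any (fun seq =>
    (PySem.List.pyRange 0 ((seq.toList.length : Int) - 2) 1).any (fun i =>
      match PySem.List.slice seq.toList (some i) (some (i + 3)) with
      | [a, b, c] =>
          if a == c && a != b then
            abas.contains (String.ofList [b], String.ofList [a])
          else false
      | _ => false))

-- ===== PORT B =====
-- for x, y in abas: if len(x)==1 and len(y)==1 and x!=y: bab = y+x+y; if any(bab in seq …): return True
-- (string concatenation y+x+y ported by hand as String.ofList of the concatenated char lists — exact)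
def has_any_bab_alt (abas : List (String × String)) (sequences : List String) : Bool :=
  abas.any (fun p =>
    if PySem.Str.len p.1 == 1 && PySem.Str.len p.2 == 1 && p.1 != p.2 then
      let bab := String.ofList (p.2.toList ++ p.1.toList ++ p.2.toList)
      sequences.any (fun seq => PySem.Str.isIn bab seq)
    else false)

-- ===== PRECONDITION & SPEC =====
def Spec_has_any_bab (abas : List (String × String)) (sequences : List String) (out : Bool) : Prop := out = has_any_bab_alt abas sequences
instance (abas : List (String × String)) (sequences : List String) (out : Bool) : Decidable (Spec_has_any_bab abas sequences out) := by unfold Spec_has_any_bab; infer_instance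

-- ===== CLAIM (what is proved, stated in full; the proofs are below) =====
def Claim_equal_has_any_bab : Prop := ∀ (abas : List (String × String)) (sequences : List String), Dom_has_any_bab abas sequences → Spec_has_any_bab abas sequences (has_any_bab abas sequences)

-- ===== LEMMAS AND PROOFS =====

theorem pv_take3 (l : List Char) (k : Nat) (h : k + 2 < l.length) :
    (l.drop k).take 3 = [l[k], l[k+1], l[k+2]] := by
  apply List.ext_getElem
  · simp; omega
  · intro i h1 h2
    have h3 : i < 3 := by simpa using h2
    simp only [List.getElem_take, List.getElem_drop]
    interval_cases i <;> simp

-- the 3-char slice A takes at a valid index, evaluated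
theorem pv_slice3 (l : List Char) (k : Nat) (hk : k + 2 < l.length) :
    PySem.List.slice l (some (k : Int)) (some ((k : Int) + 3)) = [l[k], l[k+1], l[k+2]] := by
  rw [PySem.List.slice_toNat _ (by omega) (by omega)]
  rw [show ((k : Int)).toNat = k by omega]
  rw [show ((k : Int) + 3).toNat - k = 3 by omega]
  exact pv_take3 l k hk

-- a 3-char pattern is an infix exactly when it appears at some index
theorem pv_infix3 (l : List Char) (u v w : Char) :
    [u, v, w] <:+: l ↔ ∃ k, ∃ h : k + 2 < l.length, l[k] = u ∧ l[k+1] = v ∧ l[k+2] = w := by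
  constructor
  · rintro ⟨s, t, rfl⟩
    have hlen : s.length + 2 < (s ++ [u, v, w] ++ t).length := by simp
    refine ⟨s.length, hlen, ?_, ?_, ?_⟩ <;> simp
  · rintro ⟨k, h, hu, hv, hw⟩
    refine ⟨l.take k, (l.drop k).drop 3, ?_⟩
    have h3 : [u, v, w] = (l.drop k).take 3 := by rw [pv_take3 l k h, hu, hv, hw]
    rw [h3, List.append_assoc, List.take_append_drop, List.take_append_drop]

-- A's per-sequence indexed scan, characterised
theorem pv_A_iff (abas : List (String × String)) (l : List Char) :
    ((PySem.List.pyRange 0 ((l.length : Int) - 2) 1).any (fun i =>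
      match PySem.List.slice l (some i) (some (i + 3)) with
      | [a, b, c] =>
          if a == c && a != b then abas.contains (String.ofList [b], String.ofList [a]) else false
      | _ => false)) = true ↔
    ∃ k, ∃ h : k + 2 < l.length, l[k] = l[k+2] ∧ l[k] ≠ l[k+1] ∧
      (String.ofList [l[k+1]], String.ofList [l[k]]) ∈ abas := by
  rw [List.any_eq_true]
  constructor
  · rintro ⟨i, hi, hbody⟩
    rw [PySem.List.mem_pyRange_one] at hi
    obtain ⟨hi0, hi2⟩ := hi
    obtain ⟨k, rfl⟩ : ∃ k : Nat, i = (k : Int) := ⟨i.toNat, (Int.toNat_of_nonneg hi0).symm⟩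
    have hk : k + 2 < l.length := by omega
    rw [pv_slice3 l k hk] at hbody
    simp only at hbody
    split_ifs at hbody with hcond
    simp only [Bool.and_eq_true, beq_iff_eq, bne_iff_ne] at hcond
    exact ⟨k, hk, hcond.1, hcond.2, by simpa using hbody⟩
  · rintro ⟨k, hk, hac, hab, hmem⟩
    refine ⟨(k : Int), PySem.List.mem_pyRange_one.2 ⟨by omega, by omega⟩, ?_⟩
    rw [pv_slice3 l k hk]
    simp only
    rw [if_pos (by simp only [beq_iff_eq, bne_iff_ne, Bool.and_eq_true]; exact ⟨hac, hab⟩)]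
    simpa using hmem

-- ===== VERDICT (by name: the statement is the Claim_ definition above) =====
theorem has_any_bab_spec : Claim_equal_has_any_bab := by
  intro abas sequences _
  unfold Spec_has_any_bab has_any_bab has_any_bab_alt
  rw [Bool.eq_iff_iff]
  rw [List.any_eq_true, List.any_eq_true]
  constructor
  · rintro ⟨seq, hseq, hbody⟩
    obtain ⟨k, hk, hac, hab, hmem⟩ := (pv_A_iff abas seq.toList).1 hbody
    refine ⟨(String.ofList [seq.toList[k+1]], String.ofList [seq.toList[k]]), hmem, ?_⟩
    rw [if_pos]
    · rw [List.any_eq_true]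
      refine ⟨seq, hseq, ?_⟩
      rw [PySem.Str.isIn_iff_infix]
      simp only [String.toList_ofList, List.cons_append, List.nil_append]
      exact (pv_infix3 seq.toList _ _ _).2 ⟨k, hk, rfl, rfl, hac.symm⟩
    · simp only [Bool.and_eq_true, beq_iff_eq, bne_iff_ne]
      refine ⟨⟨by simp [PySem.Str.len_eq], by simp [PySem.Str.len_eq]⟩, ?_⟩
      intro hxy
      apply hab
      have h2 := congrArg String.toList hxy
      simp only [String.toList_ofList, List.cons.injEq, and_true] at h2
      exact h2.symm
  · rintro ⟨p, hp, hbody⟩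
    split_ifs at hbody with hcond
    simp only [Bool.and_eq_true, beq_iff_eq, bne_iff_ne, PySem.Str.len_eq] at hcond
    obtain ⟨⟨hx1, hy1⟩, hxy⟩ := hcond
    obtain ⟨x0, hx0⟩ := List.length_eq_one_iff.1 (by exact_mod_cast hx1)
    obtain ⟨y0, hy0⟩ := List.length_eq_one_iff.1 (by exact_mod_cast hy1)
    rw [List.any_eq_true] at hbody
    obtain ⟨seq, hseq, hin⟩ := hbody
    rw [PySem.Str.isIn_iff_infix] at hin
    simp only [String.toList_ofList, hx0, hy0, List.cons_append, List.nil_append] at hin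
    obtain ⟨k, hk, hu, hv, hw⟩ := (pv_infix3 seq.toList y0 x0 y0).1 hin
    have hpp : (String.ofList [x0], String.ofList [y0]) = p := by
      rw [← hx0, ← hy0, String.ofList_toList, String.ofList_toList]
    refine ⟨seq, hseq, (pv_A_iff abas seq.toList).2 ⟨k, hk, by rw [hu, hw], ?_, ?_⟩⟩
    · rw [hu, hv]
      intro h
      exact hxy (String.toList_inj.mp (by rw [hx0, hy0, h]))
    · rw [hu, hv, hpp]
      exact hp
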